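-- pv_equiv track=rewrite | github.com/KERILL-l/AISD_PPA | lab4/task2.py | count_palindromic_triplets
-- ===== SOURCE A (Python) =====
-- def count_palindromic_triplets(message):
--     # Удаляем все пробелы из сообщения
--     message = message.replace(" ", "")
--     n = len(message)
--     count = 0
--
--     # Перебираем все возможные комбинации трех букв
--     for i in range(n):
--         for j in range(i + 1, n):
--             for k in range(j + 1, n):
--                 if message[i] == message[k]:
--                     count += 1
--
--     return count
-- ===== SOURCE B (Python) =====
-- def count_palindromic_triplets(message):
--     # Single pass: for each position k, pairs (i,k) with equal chars contribute
--     # (k-i-1) middle choices; maintain per-char (occurrence count, index sum).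
--     s = message.replace(" ", "")
--     total = 0
--     seen = {}  # char -> (count of earlier occurrences, sum of their indices)
--     for k, ch in enumerate(s):
--         if ch in seen:
--             c, isum = seen[ch]
--             total += c * (k - 1) - isum
--             seen[ch] = (c + 1, isum + k)
--         else:
--             seen[ch] = (1, k)
--     return total
-- ===== Notes on version B (the rewrite author's own statement) =====
-- stated objective: faster
-- what changed: Replaced the cubic triple loop by a single pass that, per character, keeps (occurrence count, index sum) in a dict and adds c*(k-1)-index_sum for each new position k of a repeated character.
import Mathlib
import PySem

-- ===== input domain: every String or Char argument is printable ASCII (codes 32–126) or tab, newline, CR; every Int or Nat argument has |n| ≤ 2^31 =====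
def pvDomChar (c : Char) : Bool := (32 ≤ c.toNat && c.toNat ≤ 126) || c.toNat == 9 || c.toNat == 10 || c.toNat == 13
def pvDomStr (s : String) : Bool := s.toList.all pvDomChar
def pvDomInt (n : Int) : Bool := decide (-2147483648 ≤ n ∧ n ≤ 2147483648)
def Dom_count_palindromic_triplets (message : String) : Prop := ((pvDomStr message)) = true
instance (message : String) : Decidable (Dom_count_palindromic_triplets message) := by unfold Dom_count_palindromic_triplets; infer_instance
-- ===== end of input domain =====

-- B replaces A's cubic triple loop by a single pass keeping per-character (count, index-sum) in a dict (objective: faster).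

-- ===== PORT A =====
def count_palindromic_triplets (message : String) : Int :=
  let msg := PySem.Str.replace message " " ""
  let n : Int := PySem.Str.len msg
  (PySem.List.pyRange 0 n 1).foldl (fun count i =>
    (PySem.List.pyRange (i + 1) n 1).foldl (fun count j =>
      (PySem.List.pyRange (j + 1) n 1).foldl (fun count k =>
        if PySem.Str.pyGet? msg i == PySem.Str.pyGet? msg k then count + 1 else count)
        count)
      count)
    0

-- ===== PORT B =====
-- one loop step of Source B: state (total, seen), item (k, ch)
def pvStepB (st : Int × PySem.Dict Char (Int × Int)) (p : Int × Char) :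
    Int × PySem.Dict Char (Int × Int) :=
  match st.2.get? p.2 with
  | some cs => (st.1 + cs.1 * (p.1 - 1) - cs.2, st.2.insert p.2 (cs.1 + 1, cs.2 + p.1))
  | none => (st.1, st.2.insert p.2 (1, p.1))

def count_palindromic_triplets_alt (message : String) : Int :=
  let s := PySem.Str.replace message " " ""
  ((PySem.List.enumerate s.toList 0).foldl pvStepB (0, PySem.Dict.empty)).1

-- ===== PRECONDITION & SPEC =====
def Spec_count_palindromic_triplets (message : String) (out : Int) : Prop := out = count_palindromic_triplets_alt message
instance (message : String) (out : Int) : Decidable (Spec_count_palindromic_triplets message out) := by unfold Spec_count_palindromic_triplets; infer_instance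

-- ===== CLAIM (what is proved, stated in full; the proofs are below) =====
def Claim_equal_count_palindromic_triplets : Prop := ∀ (message : String), Dom_count_palindromic_triplets message → Spec_count_palindromic_triplets message (count_palindromic_triplets message)

-- ===== LEMMAS AND PROOFS =====

-- sum helpers
lemma pv_sum_map_sub (r : List Int) (f g : Int → Int) :
    (r.map (fun x => f x - g x)).sum = (r.map f).sum - (r.map g).sum := by
  induction r with
  | nil => simp
  | cons x t ih => simp only [List.map_cons, List.sum_cons, ih]; ring

lemma pv_foldl_if1 (r : List Int) (p : Int → Bool) (c : Int) :
    r.foldl (fun acc k => if p k then acc + 1 else acc) c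
      = c + (r.map (fun k => if p k then (1:Int) else 0)).sum := by
  induction r generalizing c with
  | nil => simp
  | cons x t ih =>
    simp only [List.foldl_cons, List.map_cons, List.sum_cons, ih]
    by_cases h : p x
    · simp [h]; ring
    · simp [h]

-- collapse of the inner double sum:  Σ_{b≤j<n} Σ_{j<k<n} a k = Σ_{b≤k<n} (k-b)·a k
lemma pv_tri (a : Int → Int) (b : Int) (m : Nat) :
    ((PySem.List.pyRange b (b + m)).map
        (fun j => ((PySem.List.pyRange (j+1) (b + m)).map a).sum)).sum
      = ((PySem.List.pyRange b (b + m)).map (fun k => (k - b) * a k)).sum := by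
  induction m with
  | zero =>
    simp [PySem.List.pyRange_one_eq_nil (le_refl b)]
  | succ m ih =>
    have hcast : b + ((m+1 : Nat) : Int) = (b + (m:Int)) + 1 := by push_cast; ring
    have hb : b ≤ b + (m:Int) := by omega
    rw [hcast, PySem.List.pyRange_one_succ_right hb, List.map_append, List.sum_append,
      List.map_append, List.sum_append]
    have h1 : ∀ j ∈ PySem.List.pyRange b (b+(m:Int)),
        ((PySem.List.pyRange (j+1) ((b+(m:Int))+1)).map a).sum
          = ((PySem.List.pyRange (j+1) (b+(m:Int))).map a).sum + a (b+(m:Int)) := by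
      intro j hj
      obtain ⟨hj1, hj2⟩ := PySem.List.mem_pyRange_one.1 hj
      rw [PySem.List.pyRange_one_succ_right (by omega), List.map_append, List.sum_append]
      simp
    rw [List.map_congr_left h1, PySem.List.sum_map_add_int, PySem.List.sum_map_const_int,
      PySem.List.length_pyRange_one, ih]
    have h0 : PySem.List.pyRange ((b+(m:Int))+1) ((b+(m:Int))+1) = [] :=
      PySem.List.pyRange_one_eq_nil (le_refl _)
    simp only [List.map_cons, List.map_nil, List.sum_cons, List.sum_nil]
    rw [h0]
    have h2 : ((b + (m:Int) - b).toNat : Int) = (m : Int) := by omega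
    simp only [List.map_nil, List.sum_nil, h2]
    ring

lemma pv_tri' (a : Int → Int) (b n : Int) (h : b ≤ n) :
    ((PySem.List.pyRange b n).map
        (fun j => ((PySem.List.pyRange (j+1) n).map a).sum)).sum
      = ((PySem.List.pyRange b n).map (fun k => (k - b) * a k)).sum := by
  obtain ⟨m, rfl⟩ : ∃ m : Nat, n = b + m := ⟨(n-b).toNat, by omega⟩
  exact pv_tri a b m

-- the common closed-form value: Σ_{i<k} (k-i-1)·[l i = l k]
def pvG (l : List Char) : Int :=
  ((PySem.List.pyRange 0 (l.length:Int)).map (fun i =>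
    ((PySem.List.pyRange (i+1) (l.length:Int)).map (fun k =>
      (k - (i+1)) * (if PySem.List.pyGet? l i == PySem.List.pyGet? l k then (1:Int) else 0))).sum)).sum

def pvCnt (l : List Char) (c : Char) : Int :=
  ((PySem.List.pyRange 0 (l.length:Int)).map
    (fun i => if PySem.List.pyGet? l i == some c then (1:Int) else 0)).sum

def pvSum (l : List Char) (c : Char) : Int :=
  ((PySem.List.pyRange 0 (l.length:Int)).map
    (fun i => if PySem.List.pyGet? l i == some c then i else 0)).sum

lemma pv_get_append_lt (l : List Char) (c : Char) {i : Int} (h0 : 0 ≤ i) (h : i < (l.length:Int)) :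
    PySem.List.pyGet? (l ++ [c]) i = PySem.List.pyGet? l i := by
  rw [PySem.List.pyGet?_of_nonneg _ h0, PySem.List.pyGet?_of_nonneg _ h0]
  exact List.getElem?_append_left (by omega)

lemma pv_get_append_len (l : List Char) (c : Char) :
    PySem.List.pyGet? (l ++ [c]) (l.length:Int) = some c :=
  PySem.List.pyGet?_append_length l [] c

lemma pv_len_append (l : List Char) (c : Char) : (((l ++ [c]).length : Nat) : Int) = (l.length:Int) + 1 := by
  simp

lemma pvCnt_append (l : List Char) (c ch : Char) :
    pvCnt (l ++ [c]) ch = pvCnt l ch + (if c == ch then (1:Int) else 0) := by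
  unfold pvCnt
  rw [pv_len_append, PySem.List.pyRange_one_succ_right (by positivity), List.map_append,
    List.sum_append]
  have h1 : ∀ i ∈ PySem.List.pyRange 0 (l.length:Int),
      (if PySem.List.pyGet? (l ++ [c]) i == some ch then (1:Int) else 0)
        = (if PySem.List.pyGet? l i == some ch then (1:Int) else 0) := by
    intro i hi
    obtain ⟨hi1, hi2⟩ := PySem.List.mem_pyRange_one.1 hi
    rw [pv_get_append_lt l c hi1 hi2]
  rw [List.map_congr_left h1]
  simp

lemma pvSum_append (l : List Char) (c ch : Char) :
    pvSum (l ++ [c]) ch = pvSum l ch + (if c == ch then (l.length:Int) else 0) := by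
  unfold pvSum
  rw [pv_len_append, PySem.List.pyRange_one_succ_right (by positivity), List.map_append,
    List.sum_append]
  have h1 : ∀ i ∈ PySem.List.pyRange 0 (l.length:Int),
      (if PySem.List.pyGet? (l ++ [c]) i == some ch then i else 0)
        = (if PySem.List.pyGet? l i == some ch then i else 0) := by
    intro i hi
    obtain ⟨hi1, hi2⟩ := PySem.List.mem_pyRange_one.1 hi
    rw [pv_get_append_lt l c hi1 hi2]
  rw [List.map_congr_left h1]
  simp

lemma pv_notMem (l : List Char) (c : Char) (h : c ∉ l) : pvCnt l c = 0 ∧ pvSum l c = 0 := by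
  have hfalse : ∀ i : Int, (PySem.List.pyGet? l i == some c) = false := by
    intro i
    by_cases hb : PySem.List.pyGet? l i == some c
    · exact absurd (PySem.List.mem_of_pyGet?_eq_some l (eq_of_beq hb)) h
    · simpa using hb
  constructor <;> simp [pvCnt, pvSum, hfalse]

lemma pvG_append (l : List Char) (c : Char) :
    pvG (l ++ [c]) = pvG l + pvCnt l c * ((l.length:Int) - 1) - pvSum l c := by
  unfold pvG
  rw [pv_len_append, PySem.List.pyRange_one_succ_right (by positivity), List.map_append,
    List.sum_append]
  have h0 : PySem.List.pyRange ((l.length:Int)+1) ((l.length:Int)+1) = [] :=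
    PySem.List.pyRange_one_eq_nil (le_refl _)
  have h1 : ∀ i ∈ PySem.List.pyRange 0 (l.length:Int),
      ((PySem.List.pyRange (i+1) ((l.length:Int)+1)).map (fun k =>
        (k - (i+1)) * (if PySem.List.pyGet? (l ++ [c]) i == PySem.List.pyGet? (l ++ [c]) k then (1:Int) else 0))).sum
      = ((PySem.List.pyRange (i+1) (l.length:Int)).map (fun k =>
          (k - (i+1)) * (if PySem.List.pyGet? l i == PySem.List.pyGet? l k then (1:Int) else 0))).sum
        + (((l.length:Int) - 1) * (if PySem.List.pyGet? l i == some c then (1:Int) else 0)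
            - (if PySem.List.pyGet? l i == some c then i else 0)) := by
    intro i hi
    obtain ⟨hi1, hi2⟩ := PySem.List.mem_pyRange_one.1 hi
    rw [PySem.List.pyRange_one_succ_right (by omega), List.map_append, List.sum_append]
    have h2 : ∀ k ∈ PySem.List.pyRange (i+1) (l.length:Int),
        (k - (i+1)) * (if PySem.List.pyGet? (l ++ [c]) i == PySem.List.pyGet? (l ++ [c]) k then (1:Int) else 0)
          = (k - (i+1)) * (if PySem.List.pyGet? l i == PySem.List.pyGet? l k then (1:Int) else 0) := by
      intro k hk
      obtain ⟨hk1, hk2⟩ := PySem.List.mem_pyRange_one.1 hk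
      rw [pv_get_append_lt l c hi1 hi2, pv_get_append_lt l c (by omega) hk2]
    rw [List.map_congr_left h2]
    simp only [List.map_cons, List.map_nil, List.sum_cons, List.sum_nil]
    rw [pv_get_append_lt l c hi1 hi2, pv_get_append_len l c]
    by_cases hb : PySem.List.pyGet? l i == some c
    · simp [hb]; ring
    · simp [hb]
  rw [List.map_congr_left h1, PySem.List.sum_map_add_int]
  rw [pv_sum_map_sub (f := fun i => ((l.length:Int) - 1) * (if PySem.List.pyGet? l i == some c then (1:Int) else 0)) (g := fun i => if PySem.List.pyGet? l i == some c then i else 0)]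
  rw [List.sum_map_mul_left]
  simp only [List.map_cons, List.map_nil, List.sum_cons, List.sum_nil]
  rw [h0]
  simp only [List.map_nil, List.sum_nil]
  unfold pvCnt pvSum
  ring

-- A's triple loop computes pvG
lemma pvA_eq (l : List Char) :
    (PySem.List.pyRange 0 (l.length:Int)).foldl (fun count i =>
      (PySem.List.pyRange (i+1) (l.length:Int)).foldl (fun count j =>
        (PySem.List.pyRange (j+1) (l.length:Int)).foldl (fun count k =>
          if PySem.List.pyGet? l i == PySem.List.pyGet? l k then count + 1 else count)
          count) count) 0
      = pvG l := by
  have h1 : ∀ i : Int,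
      (fun (count j : Int) =>
        (PySem.List.pyRange (j+1) (l.length:Int)).foldl (fun count k =>
          if PySem.List.pyGet? l i == PySem.List.pyGet? l k then count + 1 else count) count)
      = fun count j => count +
          ((PySem.List.pyRange (j+1) (l.length:Int)).map (fun k =>
            if PySem.List.pyGet? l i == PySem.List.pyGet? l k then (1:Int) else 0)).sum := by
    intro i; funext count j
    exact pv_foldl_if1 _ _ _
  have h2 : (fun (count i : Int) =>
      (PySem.List.pyRange (i+1) (l.length:Int)).foldl (fun count j =>
        (PySem.List.pyRange (j+1) (l.length:Int)).foldl (fun count k =>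
          if PySem.List.pyGet? l i == PySem.List.pyGet? l k then count + 1 else count)
          count) count)
      = fun count i => count +
          ((PySem.List.pyRange (i+1) (l.length:Int)).map (fun j =>
            ((PySem.List.pyRange (j+1) (l.length:Int)).map (fun k =>
              if PySem.List.pyGet? l i == PySem.List.pyGet? l k then (1:Int) else 0)).sum)).sum := by
    funext count i
    rw [h1 i, PySem.List.foldl_add]
  rw [h2, PySem.List.foldl_add]
  rw [List.map_congr_left (g := fun i =>
      ((PySem.List.pyRange (i+1) (l.length:Int)).map (fun k =>
        (k - (i+1)) * (if PySem.List.pyGet? l i == PySem.List.pyGet? l k then (1:Int) else 0))).sum) ?_]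
  · unfold pvG; ring
  · intro i hi
    obtain ⟨hi1, hi2⟩ := PySem.List.mem_pyRange_one.1 hi
    exact pv_tri' _ (i+1) (l.length:Int) (by omega)

-- B's loop invariant: running total = pvG of the processed prefix, and the dict
-- holds (count, index-sum) per seen character
def pvInv (l : List Char) (d : PySem.Dict Char (Int × Int)) : Prop :=
  ∀ ch : Char, d.get? ch = if ch ∈ l then some (pvCnt l ch, pvSum l ch) else none

lemma pvB_loop (l : List Char) :
    ((PySem.List.enumerate l 0).foldl pvStepB (0, PySem.Dict.empty)).1 = pvG l
    ∧ pvInv l ((PySem.List.enumerate l 0).foldl pvStepB (0, PySem.Dict.empty)).2 := by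
  induction l using List.reverseRecOn with
  | nil =>
    constructor
    · simp [PySem.List.enumerate_nil, pvG, PySem.List.pyRange_one_eq_nil (le_refl (0:Int))]
    · intro ch
      simp [PySem.List.enumerate_nil, PySem.Dict.get?_empty]
  | append_singleton l c ih =>
    obtain ⟨h1, h2⟩ := ih
    have he : PySem.List.enumerate (l ++ [c]) 0
        = PySem.List.enumerate l 0 ++ [((l.length:Int), c)] := by
      rw [PySem.List.enumerate_append]
      simp [PySem.List.enumerate_cons, PySem.List.enumerate_nil]
    rw [he, List.foldl_append, List.foldl_cons, List.foldl_nil]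
    set st := (PySem.List.enumerate l 0).foldl pvStepB (0, PySem.Dict.empty) with hst
    unfold pvStepB
    rw [h2 c]
    by_cases hc : c ∈ l
    · simp only [hc, if_true]
      constructor
      · show st.1 + pvCnt l c * ((l.length:Int) - 1) - pvSum l c = pvG (l ++ [c])
        rw [h1, pvG_append]
      · intro ch
        show (st.2.insert c (pvCnt l c + 1, pvSum l c + (l.length:Int))).get? ch = _
        rw [PySem.Dict.get?_insert]
        by_cases hch : ch = c
        · subst hch
          simp [pvCnt_append, pvSum_append, hc]
        · have hcc : (c == ch) = false := by
            simp only [beq_eq_false_iff_ne, ne_eq]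
            exact fun h => hch h.symm
          rw [if_neg hch, h2 ch, pvCnt_append, pvSum_append, hcc]
          simp [List.mem_append, hch]
    · simp only [hc, if_false]
      obtain ⟨hz1, hz2⟩ := pv_notMem l c hc
      constructor
      · show st.1 = pvG (l ++ [c])
        rw [h1, pvG_append, hz1, hz2]; ring
      · intro ch
        show (st.2.insert c (1, (l.length:Int))).get? ch = _
        rw [PySem.Dict.get?_insert]
        by_cases hch : ch = c
        · subst hch
          simp [pvCnt_append, pvSum_append, hz1, hz2]
        · have hcc : (c == ch) = false := by
            simp only [beq_eq_false_iff_ne, ne_eq]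
            exact fun h => hch h.symm
          rw [if_neg hch, h2 ch, pvCnt_append, pvSum_append, hcc]
          simp [List.mem_append, hch]

-- ===== VERDICT (by name: the statement is the Claim_ definition above) =====
theorem count_palindromic_triplets_spec : Claim_equal_count_palindromic_triplets := by
  intro message _
  unfold Spec_count_palindromic_triplets count_palindromic_triplets count_palindromic_triplets_alt
  simp only [PySem.Str.pyGet?_eq, PySem.Chars.pyGet?_eq_listPyGet?, PySem.Str.len_eq]
  exact (pvA_eq ((PySem.Str.replace message " " "").toList)).trans
    (pvB_loop ((PySem.Str.replace message " " "").toList)).1.symm
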